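-- pv_equiv track=rewrite | github.com/miraraab/the-joy-of-movement-content-creator | src/content_pipeline.py | _parse_content_versions
-- ===== SOURCE A (Python) =====
-- def _parse_content_versions(text: str) -> dict:
--     """
--     Parse generated content to extract individual versions.
--     Expected format:
--     # BLOG POST VERSION (XXX words)
--     [content]
--     # SOCIAL MEDIA VERSION (Instagram/Facebook)
--     [content]
--     # NEWSLETTER VERSION
--     [content]
--     """
--     versions = {}
--     lines = text.split('\n')
--
--     current_version = None
--     current_content = []
--
--     for line in lines:
--         # Check for version headers
--         if '# BLOG POST VERSION' in line:
--             # Save previous version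
--             if current_version and current_content:
--                 versions[current_version] = '\n'.join(current_content).strip()
--             current_version = 'blog_post'
--             current_content = []
--         elif '# SOCIAL MEDIA VERSION' in line:
--             # Save previous version
--             if current_version and current_content:
--                 versions[current_version] = '\n'.join(current_content).strip()
--             current_version = 'social_media'
--             current_content = []
--         elif '# NEWSLETTER VERSION' in line:
--             # Save previous version
--             if current_version and current_content:
--                 versions[current_version] = '\n'.join(current_content).strip()
--             current_version = 'newsletter'
--             current_content = []
--         else:
--             # Collect content for current version
--             if current_version:
--                 current_content.append(line)
--
--     # Don't forget the last version
--     if current_version and current_content: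
--         versions[current_version] = '\n'.join(current_content).strip()
--
--     # If no versions found, return the whole text as a single version
--     if not versions:
--         versions['generated_content'] = text.strip()
--
--     return versions
-- ===== SOURCE B (Python) =====
-- # Chunk-based reimplementation: split the line list into (header, body) chunks
-- # via span-style helpers, then build the dict in one pass over the chunks.
--
-- _HEADERS = [
--     ('# BLOG POST VERSION', 'blog_post'),
--     ('# SOCIAL MEDIA VERSION', 'social_media'),
--     ('# NEWSLETTER VERSION', 'newsletter'),
-- ]
--
--
-- def _header_key(line):
--     for h, k in _HEADERS:
--         if h in line:
--             return k
--     return None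
--
--
-- def _split_body(lines):
--     """Return (prefix of non-header lines, remainder starting at first header)."""
--     i = 0
--     while i < len(lines) and _header_key(lines[i]) is None:
--         i += 1
--     return lines[:i], lines[i:]
--
--
-- def _chunks(lines):
--     """lines starts with a header line (or is empty): list of (key, body)."""
--     chunks = []
--     while lines:
--         key = _header_key(lines[0])
--         body, lines = _split_body(lines[1:])
--         chunks.append((key, body))
--     return chunks
--
--
-- def _parse_content_versions(text: str) -> dict:
--     lines = text.split('\n')
--     _, rest = _split_body(lines)   # drop any preamble before the first header
--     versions = {}
--     for key, body in _chunks(rest):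
--         if body:
--             versions[key] = '\n'.join(body).strip()
--     if not versions:
--         versions['generated_content'] = text.strip()
--     return versions
-- ===== Notes on version B (the rewrite author's own statement) =====
-- stated objective: alternative
-- what changed: Replaces A's single pass with a running (current_version, current_content) accumulator by a chunking decomposition: span-style helpers first split the line list into (header, body) chunks, then one simple pass over the chunks fills the dict.
import Mathlib
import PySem

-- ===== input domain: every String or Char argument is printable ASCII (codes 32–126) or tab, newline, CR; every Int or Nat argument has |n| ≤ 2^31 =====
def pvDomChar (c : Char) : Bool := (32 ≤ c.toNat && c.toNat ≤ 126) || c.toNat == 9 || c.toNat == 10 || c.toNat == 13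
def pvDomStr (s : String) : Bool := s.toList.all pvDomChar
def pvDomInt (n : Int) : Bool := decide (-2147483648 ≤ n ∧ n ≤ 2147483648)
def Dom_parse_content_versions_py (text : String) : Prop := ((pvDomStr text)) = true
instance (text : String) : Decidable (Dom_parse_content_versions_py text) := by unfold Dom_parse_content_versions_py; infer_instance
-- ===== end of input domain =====

-- B is an alternative decomposition of A (chunking instead of a running accumulator); same cost.

-- ===== PORT A =====

-- 'if current_version and current_content: versions[current_version] = "\n".join(current_content).strip()'
def pvSaveA (d : PySem.Dict String String) (cur : Option String) (content : List String) :
    PySem.Dict String String :=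
  match cur with
  | some k => if k ≠ "" ∧ content ≠ [] then d.insert k (PySem.Str.strip (PySem.Str.join "\n" content)) else d
  | none => d

-- the body of A's for-loop over lines, on state (versions, current_version, current_content)
def pvStepA (st : PySem.Dict String String × Option String × List String) (line : String) :
    PySem.Dict String String × Option String × List String :=
  if PySem.Str.isIn "# BLOG POST VERSION" line then
    (pvSaveA st.1 st.2.1 st.2.2, some "blog_post", [])
  else if PySem.Str.isIn "# SOCIAL MEDIA VERSION" line then
    (pvSaveA st.1 st.2.1 st.2.2, some "social_media", [])
  else if PySem.Str.isIn "# NEWSLETTER VERSION" line then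
    (pvSaveA st.1 st.2.1 st.2.2, some "newsletter", [])
  else
    (st.1, st.2.1, match st.2.1 with | some k => if k ≠ "" then st.2.2 ++ [line] else st.2.2 | none => st.2.2)

def parse_content_versions_py (text : String) : List (String × String) :=
  let lines := (PySem.Str.split? text "\n").getD []
  let st := lines.foldl pvStepA (PySem.Dict.empty, none, [])
  let v := pvSaveA st.1 st.2.1 st.2.2
  let v := if v.items = [] then v.insert "generated_content" (PySem.Str.strip text) else v
  v.items

-- ===== PORT B =====

def pvHeaderKey? (line : String) : Option String :=
  if PySem.Str.isIn "# BLOG POST VERSION" line then some "blog_post"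
  else if PySem.Str.isIn "# SOCIAL MEDIA VERSION" line then some "social_media"
  else if PySem.Str.isIn "# NEWSLETTER VERSION" line then some "newsletter"
  else none

-- _split_body: (prefix of non-header lines, remainder starting at the first header)
def pvSplitBody : List String → List String × List String
  | [] => ([], [])
  | l :: ls =>
    if pvHeaderKey? l = none then
      let (b, r) := pvSplitBody ls
      (l :: b, r)
    else ([], l :: ls)

theorem pvSplitBody_snd_length (ls : List String) : (pvSplitBody ls).2.length ≤ ls.length := by
  induction ls with
  | nil => simp [pvSplitBody]
  | cons l ls ih =>
    simp only [pvSplitBody]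
    split
    · simpa using Nat.le_succ_of_le ih
    · simp

-- _chunks: list of (key, body) pairs
def pvChunks : List String → List (Option String × List String)
  | [] => []
  | l :: ls =>
    let p := pvSplitBody ls
    (pvHeaderKey? l, p.1) :: pvChunks p.2
  termination_by ls => ls.length
  decreasing_by
    exact Nat.lt_succ_of_le (pvSplitBody_snd_length ls)

-- 'if body: versions[key] = "\n".join(body).strip()'  (key is never None at a call site)
def pvChunkStep (d : PySem.Dict String String) (c : Option String × List String) :
    PySem.Dict String String :=
  match c.1 with
  | some k => if c.2 ≠ [] then d.insert k (PySem.Str.strip (PySem.Str.join "\n" c.2)) else d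
  | none => d

def parse_content_versions_py_alt (text : String) : List (String × String) :=
  let lines := (PySem.Str.split? text "\n").getD []
  let rest := (pvSplitBody lines).2
  let v := (pvChunks rest).foldl pvChunkStep PySem.Dict.empty
  let v := if v.items = [] then v.insert "generated_content" (PySem.Str.strip text) else v
  v.items

-- ===== PRECONDITION & SPEC =====
def Spec_parse_content_versions_py (text : String) (out : List (String × String)) : Prop := out = parse_content_versions_py_alt text
instance (text : String) (out : List (String × String)) : Decidable (Spec_parse_content_versions_py text out) := by unfold Spec_parse_content_versions_py; infer_instance

-- ===== CLAIM (what is proved, stated in full; the proofs are below) =====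
def Claim_equal_parse_content_versions_py : Prop := ∀ (text : String), Dom_parse_content_versions_py text → Spec_parse_content_versions_py text (parse_content_versions_py text)

-- ===== LEMMAS AND PROOFS =====

-- A's loop from a 'some k' state equals: save the collected body at the next boundary, then fold the chunks.
theorem pvFoldA_some (lines : List String) (d : PySem.Dict String String) (k : String)
    (content : List String) :
    (let st := lines.foldl pvStepA (d, some k, content)
     pvSaveA st.1 st.2.1 st.2.2)
    = (pvChunks (pvSplitBody lines).2).foldl pvChunkStep
        (pvSaveA d (some k) (content ++ (pvSplitBody lines).1)) := by
  induction lines generalizing d k content with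
  | nil => simp [pvSplitBody, pvChunks]
  | cons l ls ih =>
    by_cases h : pvHeaderKey? l = none
    · have hstep : pvStepA (d, some k, content) l
          = (d, some k, match (some k : Option String) with
              | some k' => if k' ≠ "" then content ++ [l] else content | none => content) := by
        simp only [pvHeaderKey?] at h
        simp only [pvStepA]
        split_ifs at h ⊢ <;> simp_all
      by_cases hk : k = ""
      · subst hk
        simp only [List.foldl_cons, hstep, pvSplitBody, h, if_pos]
        rw [ih]
        simp [pvSaveA]
      · simp only [List.foldl_cons, hstep, pvSplitBody, h, if_pos]
        rw [if_pos hk, ih]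
        simp [pvSaveA, List.append_assoc]
    · -- l is a header line: A saves and resets; chunks starts a new chunk at l
      obtain ⟨k', hk'⟩ : ∃ k', pvHeaderKey? l = some k' ∧ k' ≠ "" := by
        simp only [pvHeaderKey?] at h ⊢
        split_ifs at h ⊢ <;> simp_all
      obtain ⟨hk'eq, hk'ne⟩ := hk'
      have hstep : pvStepA (d, some k, content) l = (pvSaveA d (some k) content, some k', []) := by
        simp only [pvHeaderKey?] at hk'eq
        simp only [pvStepA]
        split_ifs at hk'eq ⊢ <;> simp_all
      have hsb : pvSplitBody (l :: ls) = ([], l :: ls) := by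
        simp [pvSplitBody, h]
      simp only [List.foldl_cons, hstep, hsb]
      rw [ih]
      have hch : pvChunks (l :: ls) = (pvHeaderKey? l, (pvSplitBody ls).1) :: pvChunks (pvSplitBody ls).2 := by
        rw [pvChunks.eq_def]
      rw [hch, List.foldl_cons, hk'eq]
      have : pvChunkStep (pvSaveA d (some k) (content ++ [])) (some k', (pvSplitBody ls).1)
          = pvSaveA (pvSaveA d (some k) content) (some k') ([] ++ (pvSplitBody ls).1) := by
        simp [pvChunkStep, pvSaveA, hk'ne]
      rw [this]

-- A's loop from the initial 'None' state equals folding the chunks of the post-preamble remainder.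
theorem pvFoldA_none (lines : List String) (d : PySem.Dict String String) :
    (let st := lines.foldl pvStepA (d, none, [])
     pvSaveA st.1 st.2.1 st.2.2)
    = (pvChunks (pvSplitBody lines).2).foldl pvChunkStep d := by
  induction lines generalizing d with
  | nil => simp [pvSplitBody, pvSaveA, pvChunks]
  | cons l ls ih =>
    by_cases h : pvHeaderKey? l = none
    · have hstep : pvStepA (d, none, []) l = (d, none, []) := by
        simp only [pvHeaderKey?] at h
        simp only [pvStepA]
        split_ifs at h ⊢ <;> simp_all [pvSaveA]
      simp only [List.foldl_cons, hstep, pvSplitBody, h, if_pos]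
      exact ih d
    · obtain ⟨k', hk'eq, hk'ne⟩ : ∃ k', pvHeaderKey? l = some k' ∧ k' ≠ "" := by
        simp only [pvHeaderKey?] at h ⊢
        split_ifs at h ⊢ <;> simp_all
      have hstep : pvStepA (d, none, []) l = (d, some k', []) := by
        simp only [pvHeaderKey?] at hk'eq
        simp only [pvStepA]
        split_ifs at hk'eq ⊢ <;> simp_all [pvSaveA]
      have hsb : pvSplitBody (l :: ls) = ([], l :: ls) := by
        simp [pvSplitBody, h]
      simp only [List.foldl_cons, hstep, hsb]
      have := pvFoldA_some ls d k' []
      simp only at this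
      rw [this]
      have hch : pvChunks (l :: ls) = (pvHeaderKey? l, (pvSplitBody ls).1) :: pvChunks (pvSplitBody ls).2 := by
        rw [pvChunks.eq_def]
      rw [hch, List.foldl_cons, hk'eq]
      have : pvChunkStep d (some k', (pvSplitBody ls).1)
          = pvSaveA d (some k') ([] ++ (pvSplitBody ls).1) := by
        simp [pvChunkStep, pvSaveA, hk'ne]
      rw [this]

-- ===== VERDICT (by name: the statement is the Claim_ definition above) =====
theorem parse_content_versions_py_spec : Claim_equal_parse_content_versions_py := by
  intro text _
  unfold Spec_parse_content_versions_py parse_content_versions_py parse_content_versions_py_alt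
  simp only
  rw [pvFoldA_none]
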